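-- pv_equiv track=rewrite | github.com/camilariquelme/FPS | M3/desafioss/sentenciasII/fuerza_bruta.py | fuerza_bruta
-- ===== SOURCE A (Python) =====
-- from string import ascii_lowercase
--
-- def fuerza_bruta(password):
--     intentos = 0
--     for i, char in enumerate(password.lower()):
--         for letra in ascii_lowercase:
--             intentos += 1
--             if letra == char:
--                 break
--     return intentos
-- ===== SOURCE B (Python) =====
-- def fuerza_bruta(password):
--     intentos = 0
--     for char in password.lower():
--         if 'a' <= char <= 'z':
--             intentos += ord(char) - ord('a') + 1
--         else:
--             intentos += 26
--     return intentos
-- ===== Notes on version B (the rewrite author's own statement) =====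
-- stated objective: faster
-- what changed: Replaced the inner 26-letter linear search with direct arithmetic in a single pass: each lowercase letter contributes its alphabet position and any other character contributes 26.
import Mathlib
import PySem

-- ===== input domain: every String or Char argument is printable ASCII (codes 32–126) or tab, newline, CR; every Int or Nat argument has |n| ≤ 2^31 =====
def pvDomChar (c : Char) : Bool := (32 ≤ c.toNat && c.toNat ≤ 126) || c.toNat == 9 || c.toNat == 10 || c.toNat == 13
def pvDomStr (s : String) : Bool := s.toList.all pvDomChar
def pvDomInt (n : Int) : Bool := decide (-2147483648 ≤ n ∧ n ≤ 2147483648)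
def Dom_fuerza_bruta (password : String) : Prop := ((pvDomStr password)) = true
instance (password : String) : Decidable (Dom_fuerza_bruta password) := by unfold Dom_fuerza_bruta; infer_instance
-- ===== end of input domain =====

-- B replaces A's inner 26-letter linear search with direct per-character arithmetic (simpler, single pass).

-- ===== PORT A =====
-- string.ascii_lowercase
def pvAsciiLowercase : List Char :=
  ['a','b','c','d','e','f','g','h','i','j','k','l','m',
   'n','o','p','q','r','s','t','u','v','w','x','y','z']

-- inner loop: 'for letra in ascii_lowercase: intentos += 1; if letra == char: break'
def pvInner (letters : List Char) (c : Char) (acc : Int) : Int :=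
  match letters with
  | [] => acc
  | l :: ls => if l == c then acc + 1 else pvInner ls c (acc + 1)

def fuerza_bruta (password : String) : Int :=
  (PySem.Str.lower password).toList.foldl (fun acc c => pvInner pvAsciiLowercase c acc) 0

-- ===== PORT B =====
def fuerza_bruta_alt (password : String) : Int :=
  (PySem.Str.lower password).toList.foldl
    (fun acc c =>
      if 'a' ≤ c ∧ c ≤ 'z' then acc + ((c.toNat : Int) - ('a'.toNat : Int) + 1) else acc + 26) 0

-- ===== PRECONDITION & SPEC =====
def Spec_fuerza_bruta (password : String) (out : Int) : Prop := out = fuerza_bruta_alt password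
instance (password : String) (out : Int) : Decidable (Spec_fuerza_bruta password out) := by unfold Spec_fuerza_bruta; infer_instance

-- ===== CLAIM (what is proved, stated in full; the proofs are below) =====
def Claim_equal_fuerza_bruta : Prop := ∀ (password : String), Dom_fuerza_bruta password → Spec_fuerza_bruta password (fuerza_bruta password)

-- ===== LEMMAS AND PROOFS =====

theorem pvCharOf (c : Char) (d : Char) (h : c.toNat = d.toNat) : c = d := by
  apply Char.ext; apply UInt32.toNat_inj.mp; exact h

theorem pvInner_eq (c : Char) (acc : Int) :
    pvInner pvAsciiLowercase c acc =
      (if 'a' ≤ c ∧ c ≤ 'z' then acc + ((c.toNat : Int) - ('a'.toNat : Int) + 1) else acc + 26) := by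
  by_cases hc : 'a' ≤ c ∧ c ≤ 'z'
  · obtain ⟨hl, hu⟩ := hc
    have hl' : 97 ≤ c.toNat := hl
    have hu' : c.toNat ≤ 122 := hu
    have hd : c.toNat = 97 ∨ c.toNat = 98 ∨ c.toNat = 99 ∨ c.toNat = 100 ∨ c.toNat = 101 ∨ c.toNat = 102 ∨ c.toNat = 103 ∨ c.toNat = 104 ∨ c.toNat = 105 ∨ c.toNat = 106 ∨ c.toNat = 107 ∨ c.toNat = 108 ∨ c.toNat = 109 ∨ c.toNat = 110 ∨ c.toNat = 111 ∨ c.toNat = 112 ∨ c.toNat = 113 ∨ c.toNat = 114 ∨ c.toNat = 115 ∨ c.toNat = 116 ∨ c.toNat = 117 ∨ c.toNat = 118 ∨ c.toNat = 119 ∨ c.toNat = 120 ∨ c.toNat = 121 ∨ c.toNat = 122 := by omega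
    rcases hd with h | hd
    · have : c = 'a' := pvCharOf c 'a' h
      subst this
      rw [if_pos (by decide)]
      simp only [pvInner, pvAsciiLowercase]
      rw [if_pos (by decide), show (('a'.toNat : Int) - ('a'.toNat : Int) + 1) = 1 from by decide]
      try ring
    rcases hd with h | hd
    · have : c = 'b' := pvCharOf c 'b' h
      subst this
      rw [if_pos (by decide)]
      simp only [pvInner, pvAsciiLowercase]
      rw [if_neg (by decide), if_pos (by decide), show (('b'.toNat : Int) - ('a'.toNat : Int) + 1) = 2 from by decide]
      try ring
    rcases hd with h | hd
    · have : c = 'c' := pvCharOf c 'c' h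
      subst this
      rw [if_pos (by decide)]
      simp only [pvInner, pvAsciiLowercase]
      rw [if_neg (by decide), if_neg (by decide), if_pos (by decide), show (('c'.toNat : Int) - ('a'.toNat : Int) + 1) = 3 from by decide]
      try ring
    rcases hd with h | hd
    · have : c = 'd' := pvCharOf c 'd' h
      subst this
      rw [if_pos (by decide)]
      simp only [pvInner, pvAsciiLowercase]
      rw [if_neg (by decide), if_neg (by decide), if_neg (by decide), if_pos (by decide), show (('d'.toNat : Int) - ('a'.toNat : Int) + 1) = 4 from by decide]
      try ring
    rcases hd with h | hd
    · have : c = 'e' := pvCharOf c 'e' h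
      subst this
      rw [if_pos (by decide)]
      simp only [pvInner, pvAsciiLowercase]
      rw [if_neg (by decide), if_neg (by decide), if_neg (by decide), if_neg (by decide), if_pos (by decide), show (('e'.toNat : Int) - ('a'.toNat : Int) + 1) = 5 from by decide]
      try ring
    rcases hd with h | hd
    · have : c = 'f' := pvCharOf c 'f' h
      subst this
      rw [if_pos (by decide)]
      simp only [pvInner, pvAsciiLowercase]
      rw [if_neg (by decide), if_neg (by decide), if_neg (by decide), if_neg (by decide), if_neg (by decide), if_pos (by decide), show (('f'.toNat : Int) - ('a'.toNat : Int) + 1) = 6 from by decide]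
      try ring
    rcases hd with h | hd
    · have : c = 'g' := pvCharOf c 'g' h
      subst this
      rw [if_pos (by decide)]
      simp only [pvInner, pvAsciiLowercase]
      rw [if_neg (by decide), if_neg (by decide), if_neg (by decide), if_neg (by decide), if_neg (by decide), if_neg (by decide), if_pos (by decide), show (('g'.toNat : Int) - ('a'.toNat : Int) + 1) = 7 from by decide]
      try ring
    rcases hd with h | hd
    · have : c = 'h' := pvCharOf c 'h' h
      subst this
      rw [if_pos (by decide)]
      simp only [pvInner, pvAsciiLowercase]
      rw [if_neg (by decide), if_neg (by decide), if_neg (by decide), if_neg (by decide), if_neg (by decide), if_neg (by decide), if_neg (by decide), if_pos (by decide), show (('h'.toNat : Int) - ('a'.toNat : Int) + 1) = 8 from by decide]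
      try ring
    rcases hd with h | hd
    · have : c = 'i' := pvCharOf c 'i' h
      subst this
      rw [if_pos (by decide)]
      simp only [pvInner, pvAsciiLowercase]
      rw [if_neg (by decide), if_neg (by decide), if_neg (by decide), if_neg (by decide), if_neg (by decide), if_neg (by decide), if_neg (by decide), if_neg (by decide), if_pos (by decide), show (('i'.toNat : Int) - ('a'.toNat : Int) + 1) = 9 from by decide]
      try ring
    rcases hd with h | hd
    · have : c = 'j' := pvCharOf c 'j' h
      subst this
      rw [if_pos (by decide)]
      simp only [pvInner, pvAsciiLowercase]
      rw [if_neg (by decide), if_neg (by decide), if_neg (by decide), if_neg (by decide), if_neg (by decide), if_neg (by decide), if_neg (by decide), if_neg (by decide), if_neg (by decide), if_pos (by decide), show (('j'.toNat : Int) - ('a'.toNat : Int) + 1) = 10 from by decide]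
      try ring
    rcases hd with h | hd
    · have : c = 'k' := pvCharOf c 'k' h
      subst this
      rw [if_pos (by decide)]
      simp only [pvInner, pvAsciiLowercase]
      rw [if_neg (by decide), if_neg (by decide), if_neg (by decide), if_neg (by decide), if_neg (by decide), if_neg (by decide), if_neg (by decide), if_neg (by decide), if_neg (by decide), if_neg (by decide), if_pos (by decide), show (('k'.toNat : Int) - ('a'.toNat : Int) + 1) = 11 from by decide]
      try ring
    rcases hd with h | hd
    · have : c = 'l' := pvCharOf c 'l' h
      subst this
      rw [if_pos (by decide)]
      simp only [pvInner, pvAsciiLowercase]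
      rw [if_neg (by decide), if_neg (by decide), if_neg (by decide), if_neg (by decide), if_neg (by decide), if_neg (by decide), if_neg (by decide), if_neg (by decide), if_neg (by decide), if_neg (by decide), if_neg (by decide), if_pos (by decide), show (('l'.toNat : Int) - ('a'.toNat : Int) + 1) = 12 from by decide]
      try ring
    rcases hd with h | hd
    · have : c = 'm' := pvCharOf c 'm' h
      subst this
      rw [if_pos (by decide)]
      simp only [pvInner, pvAsciiLowercase]
      rw [if_neg (by decide), if_neg (by decide), if_neg (by decide), if_neg (by decide), if_neg (by decide), if_neg (by decide), if_neg (by decide), if_neg (by decide), if_neg (by decide), if_neg (by decide), if_neg (by decide), if_neg (by decide), if_pos (by decide), show (('m'.toNat : Int) - ('a'.toNat : Int) + 1) = 13 from by decide]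
      try ring
    rcases hd with h | hd
    · have : c = 'n' := pvCharOf c 'n' h
      subst this
      rw [if_pos (by decide)]
      simp only [pvInner, pvAsciiLowercase]
      rw [if_neg (by decide), if_neg (by decide), if_neg (by decide), if_neg (by decide), if_neg (by decide), if_neg (by decide), if_neg (by decide), if_neg (by decide), if_neg (by decide), if_neg (by decide), if_neg (by decide), if_neg (by decide), if_neg (by decide), if_pos (by decide), show (('n'.toNat : Int) - ('a'.toNat : Int) + 1) = 14 from by decide]
      try ring
    rcases hd with h | hd
    · have : c = 'o' := pvCharOf c 'o' h
      subst this
      rw [if_pos (by decide)]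
      simp only [pvInner, pvAsciiLowercase]
      rw [if_neg (by decide), if_neg (by decide), if_neg (by decide), if_neg (by decide), if_neg (by decide), if_neg (by decide), if_neg (by decide), if_neg (by decide), if_neg (by decide), if_neg (by decide), if_neg (by decide), if_neg (by decide), if_neg (by decide), if_neg (by decide), if_pos (by decide), show (('o'.toNat : Int) - ('a'.toNat : Int) + 1) = 15 from by decide]
      try ring
    rcases hd with h | hd
    · have : c = 'p' := pvCharOf c 'p' h
      subst this
      rw [if_pos (by decide)]
      simp only [pvInner, pvAsciiLowercase]
      rw [if_neg (by decide), if_neg (by decide), if_neg (by decide), if_neg (by decide), if_neg (by decide), if_neg (by decide), if_neg (by decide), if_neg (by decide), if_neg (by decide), if_neg (by decide), if_neg (by decide), if_neg (by decide), if_neg (by decide), if_neg (by decide), if_neg (by decide), if_pos (by decide), show (('p'.toNat : Int) - ('a'.toNat : Int) + 1) = 16 from by decide]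
      try ring
    rcases hd with h | hd
    · have : c = 'q' := pvCharOf c 'q' h
      subst this
      rw [if_pos (by decide)]
      simp only [pvInner, pvAsciiLowercase]
      rw [if_neg (by decide), if_neg (by decide), if_neg (by decide), if_neg (by decide), if_neg (by decide), if_neg (by decide), if_neg (by decide), if_neg (by decide), if_neg (by decide), if_neg (by decide), if_neg (by decide), if_neg (by decide), if_neg (by decide), if_neg (by decide), if_neg (by decide), if_neg (by decide), if_pos (by decide), show (('q'.toNat : Int) - ('a'.toNat : Int) + 1) = 17 from by decide]
      try ring
    rcases hd with h | hd
    · have : c = 'r' := pvCharOf c 'r' h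
      subst this
      rw [if_pos (by decide)]
      simp only [pvInner, pvAsciiLowercase]
      rw [if_neg (by decide), if_neg (by decide), if_neg (by decide), if_neg (by decide), if_neg (by decide), if_neg (by decide), if_neg (by decide), if_neg (by decide), if_neg (by decide), if_neg (by decide), if_neg (by decide), if_neg (by decide), if_neg (by decide), if_neg (by decide), if_neg (by decide), if_neg (by decide), if_neg (by decide), if_pos (by decide), show (('r'.toNat : Int) - ('a'.toNat : Int) + 1) = 18 from by decide]
      try ring
    rcases hd with h | hd
    · have : c = 's' := pvCharOf c 's' h
      subst this
      rw [if_pos (by decide)]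
      simp only [pvInner, pvAsciiLowercase]
      rw [if_neg (by decide), if_neg (by decide), if_neg (by decide), if_neg (by decide), if_neg (by decide), if_neg (by decide), if_neg (by decide), if_neg (by decide), if_neg (by decide), if_neg (by decide), if_neg (by decide), if_neg (by decide), if_neg (by decide), if_neg (by decide), if_neg (by decide), if_neg (by decide), if_neg (by decide), if_neg (by decide), if_pos (by decide), show (('s'.toNat : Int) - ('a'.toNat : Int) + 1) = 19 from by decide]
      try ring
    rcases hd with h | hd
    · have : c = 't' := pvCharOf c 't' h
      subst this
      rw [if_pos (by decide)]
      simp only [pvInner, pvAsciiLowercase]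
      rw [if_neg (by decide), if_neg (by decide), if_neg (by decide), if_neg (by decide), if_neg (by decide), if_neg (by decide), if_neg (by decide), if_neg (by decide), if_neg (by decide), if_neg (by decide), if_neg (by decide), if_neg (by decide), if_neg (by decide), if_neg (by decide), if_neg (by decide), if_neg (by decide), if_neg (by decide), if_neg (by decide), if_neg (by decide), if_pos (by decide), show (('t'.toNat : Int) - ('a'.toNat : Int) + 1) = 20 from by decide]
      try ring
    rcases hd with h | hd
    · have : c = 'u' := pvCharOf c 'u' h
      subst this
      rw [if_pos (by decide)]
      simp only [pvInner, pvAsciiLowercase]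
      rw [if_neg (by decide), if_neg (by decide), if_neg (by decide), if_neg (by decide), if_neg (by decide), if_neg (by decide), if_neg (by decide), if_neg (by decide), if_neg (by decide), if_neg (by decide), if_neg (by decide), if_neg (by decide), if_neg (by decide), if_neg (by decide), if_neg (by decide), if_neg (by decide), if_neg (by decide), if_neg (by decide), if_neg (by decide), if_neg (by decide), if_pos (by decide), show (('u'.toNat : Int) - ('a'.toNat : Int) + 1) = 21 from by decide]
      try ring
    rcases hd with h | hd
    · have : c = 'v' := pvCharOf c 'v' h
      subst this
      rw [if_pos (by decide)]
      simp only [pvInner, pvAsciiLowercase]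
      rw [if_neg (by decide), if_neg (by decide), if_neg (by decide), if_neg (by decide), if_neg (by decide), if_neg (by decide), if_neg (by decide), if_neg (by decide), if_neg (by decide), if_neg (by decide), if_neg (by decide), if_neg (by decide), if_neg (by decide), if_neg (by decide), if_neg (by decide), if_neg (by decide), if_neg (by decide), if_neg (by decide), if_neg (by decide), if_neg (by decide), if_neg (by decide), if_pos (by decide), show (('v'.toNat : Int) - ('a'.toNat : Int) + 1) = 22 from by decide]
      try ring
    rcases hd with h | hd
    · have : c = 'w' := pvCharOf c 'w' h
      subst this
      rw [if_pos (by decide)]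
      simp only [pvInner, pvAsciiLowercase]
      rw [if_neg (by decide), if_neg (by decide), if_neg (by decide), if_neg (by decide), if_neg (by decide), if_neg (by decide), if_neg (by decide), if_neg (by decide), if_neg (by decide), if_neg (by decide), if_neg (by decide), if_neg (by decide), if_neg (by decide), if_neg (by decide), if_neg (by decide), if_neg (by decide), if_neg (by decide), if_neg (by decide), if_neg (by decide), if_neg (by decide), if_neg (by decide), if_neg (by decide), if_pos (by decide), show (('w'.toNat : Int) - ('a'.toNat : Int) + 1) = 23 from by decide]
      try ring
    rcases hd with h | hd
    · have : c = 'x' := pvCharOf c 'x' h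
      subst this
      rw [if_pos (by decide)]
      simp only [pvInner, pvAsciiLowercase]
      rw [if_neg (by decide), if_neg (by decide), if_neg (by decide), if_neg (by decide), if_neg (by decide), if_neg (by decide), if_neg (by decide), if_neg (by decide), if_neg (by decide), if_neg (by decide), if_neg (by decide), if_neg (by decide), if_neg (by decide), if_neg (by decide), if_neg (by decide), if_neg (by decide), if_neg (by decide), if_neg (by decide), if_neg (by decide), if_neg (by decide), if_neg (by decide), if_neg (by decide), if_neg (by decide), if_pos (by decide), show (('x'.toNat : Int) - ('a'.toNat : Int) + 1) = 24 from by decide]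
      try ring
    rcases hd with h | hd
    · have : c = 'y' := pvCharOf c 'y' h
      subst this
      rw [if_pos (by decide)]
      simp only [pvInner, pvAsciiLowercase]
      rw [if_neg (by decide), if_neg (by decide), if_neg (by decide), if_neg (by decide), if_neg (by decide), if_neg (by decide), if_neg (by decide), if_neg (by decide), if_neg (by decide), if_neg (by decide), if_neg (by decide), if_neg (by decide), if_neg (by decide), if_neg (by decide), if_neg (by decide), if_neg (by decide), if_neg (by decide), if_neg (by decide), if_neg (by decide), if_neg (by decide), if_neg (by decide), if_neg (by decide), if_neg (by decide), if_neg (by decide), if_pos (by decide), show (('y'.toNat : Int) - ('a'.toNat : Int) + 1) = 25 from by decide]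
      try ring
    · have : c = 'z' := pvCharOf c 'z' hd
      subst this
      rw [if_pos (by decide)]
      simp only [pvInner, pvAsciiLowercase]
      rw [if_neg (by decide), if_neg (by decide), if_neg (by decide), if_neg (by decide), if_neg (by decide), if_neg (by decide), if_neg (by decide), if_neg (by decide), if_neg (by decide), if_neg (by decide), if_neg (by decide), if_neg (by decide), if_neg (by decide), if_neg (by decide), if_neg (by decide), if_neg (by decide), if_neg (by decide), if_neg (by decide), if_neg (by decide), if_neg (by decide), if_neg (by decide), if_neg (by decide), if_neg (by decide), if_neg (by decide), if_neg (by decide), if_pos (by decide), show (('z'.toNat : Int) - ('a'.toNat : Int) + 1) = 26 from by decide]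
      try ring
  · rw [if_neg hc]
    have hno : ∀ d : Char, ('a' ≤ d ∧ d ≤ 'z') → (d == c) = false := by
      intro d hd
      rw [beq_eq_false_iff_ne]
      intro h; subst h; exact hc hd
    simp only [pvInner, pvAsciiLowercase]
    simp only [hno 'a' (by decide), hno 'b' (by decide), hno 'c' (by decide), hno 'd' (by decide), hno 'e' (by decide), hno 'f' (by decide), hno 'g' (by decide), hno 'h' (by decide), hno 'i' (by decide), hno 'j' (by decide), hno 'k' (by decide), hno 'l' (by decide), hno 'm' (by decide), hno 'n' (by decide), hno 'o' (by decide), hno 'p' (by decide), hno 'q' (by decide), hno 'r' (by decide), hno 's' (by decide), hno 't' (by decide), hno 'u' (by decide), hno 'v' (by decide), hno 'w' (by decide), hno 'x' (by decide), hno 'y' (by decide), hno 'z' (by decide), Bool.false_eq_true, if_false]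
    ring

theorem pvFold_eq (l : List Char) (acc : Int) :
    l.foldl (fun acc c => pvInner pvAsciiLowercase c acc) acc =
    l.foldl (fun acc c =>
      if 'a' ≤ c ∧ c ≤ 'z' then acc + ((c.toNat : Int) - ('a'.toNat : Int) + 1) else acc + 26) acc := by
  induction l generalizing acc with
  | nil => rfl
  | cons c cs ih =>
      simp only [List.foldl_cons]
      rw [pvInner_eq]
      exact ih _

-- ===== VERDICT (by name: the statement is the Claim_ definition above) =====
theorem fuerza_bruta_spec : Claim_equal_fuerza_bruta := by
  intro password _
  unfold Spec_fuerza_bruta fuerza_bruta fuerza_bruta_alt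
  exact pvFold_eq _ 0
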